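-- pv_equiv track=rewrite | github.com/vinchinzu/euler | python/945.py | xor_product
-- ===== SOURCE A (Python) =====
-- def xor_product(x, y):
--     """Compute XOR-product of x and y.
--
--     # O(log x * log y) time
--     """
--     result = 0
--     bit_pos = 0
--     while y > 0:
--         if y & 1:
--             result ^= (x << bit_pos)
--         y >>= 1
--         bit_pos += 1
--     return result
-- ===== SOURCE B (Python) =====
-- def xor_product(x, y):
--     """Compute XOR-product of x and y.
--
--     Recursive Horner scheme over y's bits, most-significant first:
--     combine the partial product for y >> 1 by shifting it left once,
--     then XOR in x if the lowest bit of y is set.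
--     """
--     if y <= 0:
--         return 0
--     return (xor_product(x, y >> 1) << 1) ^ (x if y & 1 else 0)
-- ===== Notes on version B (the rewrite author's own statement) =====
-- stated objective: alternative
-- what changed: Replaces A's iterative LSB-first loop (accumulator plus an explicit bit_pos counter that shifts x further each round) with a recursive MSB-first Horner scheme that shifts the partial result left once per bit and never tracks a position.
import Mathlib
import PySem

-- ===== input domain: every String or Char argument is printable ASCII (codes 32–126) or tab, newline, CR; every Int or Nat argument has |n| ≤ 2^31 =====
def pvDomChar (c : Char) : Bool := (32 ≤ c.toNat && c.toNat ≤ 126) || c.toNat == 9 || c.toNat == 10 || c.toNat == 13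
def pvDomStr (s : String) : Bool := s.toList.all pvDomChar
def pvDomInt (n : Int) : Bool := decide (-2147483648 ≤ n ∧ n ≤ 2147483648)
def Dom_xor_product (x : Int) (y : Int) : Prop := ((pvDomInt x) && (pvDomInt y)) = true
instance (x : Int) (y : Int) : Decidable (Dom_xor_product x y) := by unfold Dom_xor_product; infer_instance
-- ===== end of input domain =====

-- B replaces A's iterative LSB-first shift-and-XOR loop (with a bit_pos counter) by a
-- recursive MSB-first Horner scheme that shifts the partial result; same cost, alternative shape.

-- termination helper for both ports' recursion on y (y >> 1 shrinks a positive y)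
theorem pvShiftHalfLt (y : Int) (h : 0 < y) : (y >>> (1 : Nat)).toNat < y.toNat := by
  rw [Int.shiftRight_eq_div_pow]; omega

-- ===== PORT A =====
-- while y > 0: if y & 1: result ^= (x << bit_pos); y >>= 1; bit_pos += 1
-- (bit_pos is a loop counter starting at 0, hence carried as a Nat shift amount)
def xorLoopA (x result : Int) (bitPos : Nat) (y : Int) : Int :=
  if h : 0 < y then
    xorLoopA x
      (if PySem.Int.band y 1 ≠ 0 then PySem.Int.bxor result (x <<< bitPos) else result)
      (bitPos + 1) (y >>> (1 : Nat))
  else result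
termination_by y.toNat
decreasing_by exact pvShiftHalfLt y h

def xor_product (x : Int) (y : Int) : Int := xorLoopA x 0 0 y

-- ===== PORT B =====
def xor_product_alt (x : Int) (y : Int) : Int :=
  if _h : y ≤ 0 then 0
  else PySem.Int.bxor ((xor_product_alt x (y >>> (1 : Nat))) <<< (1 : Nat))
         (if PySem.Int.band y 1 ≠ 0 then x else 0)
termination_by y.toNat
decreasing_by exact pvShiftHalfLt y (by omega)

-- ===== PRECONDITION & SPEC =====
def Spec_xor_product (x : Int) (y : Int) (out : Int) : Prop := out = xor_product_alt x y
instance (x : Int) (y : Int) (out : Int) : Decidable (Spec_xor_product x y out) := by unfold Spec_xor_product; infer_instance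

-- ===== CLAIM (what is proved, stated in full; the proofs are below) =====
def Claim_equal_xor_product : Prop := ∀ (x : Int) (y : Int), Dom_xor_product x y → Spec_xor_product x y (xor_product x y)

-- ===== LEMMAS AND PROOFS =====

-- Every Int is `pvDec s m`: sign bit s and "code" m (two's-complement payload).
def pvDec (s : Bool) (m : Nat) : Int := if s then -(m : Int) - 1 else (m : Int)

theorem pvDec_surj (a : Int) : pvDec (decide (a < 0)) (if a < 0 then (-a - 1).toNat else a.toNat) = a := by
  by_cases h : a < 0 <;> simp [pvDec, h] <;> omega

theorem pvBxor_dec (sa sb : Bool) (m n : Nat) :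
    PySem.Int.bxor (pvDec sa m) (pvDec sb n) = pvDec (sa != sb) (m ^^^ n) := by
  have hm1 : ((m : Int)).toNat = m := by omega
  have hn1 : ((n : Int)).toNat = n := by omega
  have hm2 : (-(-(m : Int) - 1) - 1).toNat = m := by omega
  have hn2 : (-(-(n : Int) - 1) - 1).toNat = n := by omega
  cases sa <;> cases sb
  · show PySem.Int.bxor (m : Int) (n : Int) = ((m ^^^ n : Nat) : Int)
    unfold PySem.Int.bxor
    rw [if_pos (by omega), if_pos (by omega), hm1, hn1]
  · show PySem.Int.bxor (m : Int) (-(n : Int) - 1) = -((m ^^^ n : Nat) : Int) - 1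
    unfold PySem.Int.bxor
    rw [if_pos (by omega), if_neg (by omega), hm1, hn2]
  · show PySem.Int.bxor (-(m : Int) - 1) (n : Int) = -((m ^^^ n : Nat) : Int) - 1
    unfold PySem.Int.bxor
    rw [if_neg (by omega), if_pos (by omega), hm2, hn1]
  · show PySem.Int.bxor (-(m : Int) - 1) (-(n : Int) - 1) = ((m ^^^ n : Nat) : Int)
    unfold PySem.Int.bxor
    rw [if_neg (by omega), if_neg (by omega), hm2, hn2]

-- Nat-level facts used to push a left shift through pvDec / XOR
theorem pvNat_xor_shiftLeft (m n k : Nat) : (m ^^^ n) <<< k = (m <<< k) ^^^ (n <<< k) := by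
  apply Nat.eq_of_testBit_eq; intro i
  simp [Nat.testBit_shiftLeft, Nat.testBit_xor, Bool.and_xor_distrib_left]

theorem pvNat_shiftLeft_xor_ones (m : Nat) : ∀ k, (m <<< k) ^^^ (2 ^ k - 1) = m <<< k + (2 ^ k - 1)
  | 0 => by simp
  | k + 1 => by
    have hp : (1 : Nat) ≤ 2 ^ k := Nat.one_le_two_pow
    have h1 : m <<< (k + 1) = Nat.bit false (m <<< k) := by
      rw [Nat.bit_val, Nat.shiftLeft_eq, Nat.shiftLeft_eq, pow_succ]; simp; ring
    have h2 : 2 ^ (k + 1) - 1 = Nat.bit true (2 ^ k - 1) := by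
      rw [Nat.bit_val, pow_succ]; simp; omega
    rw [h1, h2, Nat.xor_bit, pvNat_shiftLeft_xor_ones m k, Nat.bit_val, Nat.bit_val, Nat.bit_val]
    simp
    omega

-- the code of a shifted pvDec: plain shift for s = false, shift plus trailing ones for s = true
theorem pvF_xor (sa sb : Bool) (m n k : Nat) :
    (if sa then m <<< k + (2 ^ k - 1) else m <<< k) ^^^ (if sb then n <<< k + (2 ^ k - 1) else n <<< k)
      = (if (sa != sb) then (m ^^^ n) <<< k + (2 ^ k - 1) else (m ^^^ n) <<< k) := by
  have E := pvNat_shiftLeft_xor_ones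
  cases sa <;> cases sb <;> simp only [Bool.bne_false, Bool.bne_true, Bool.not_false, Bool.not_true, if_true, if_false,
    Bool.false_eq_true]
  · rw [pvNat_xor_shiftLeft]
  · rw [← E n k, ← Nat.xor_assoc, ← pvNat_xor_shiftLeft, E]
  · rw [← E m k, Nat.xor_comm, ← Nat.xor_assoc, Nat.xor_comm (n <<< k), ← pvNat_xor_shiftLeft, E]
  · rw [← E m k, ← E n k, Nat.xor_assoc, Nat.xor_comm (2 ^ k - 1), Nat.xor_assoc, Nat.xor_self,
        Nat.xor_zero, ← pvNat_xor_shiftLeft]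

theorem pvDec_shiftLeft (s : Bool) (m k : Nat) :
    (pvDec s m) <<< k = pvDec s (if s then m <<< k + (2 ^ k - 1) else m <<< k) := by
  cases s
  · show ((m : Int)) <<< k = ((m <<< k : Nat) : Int)
    rw [Int.shiftLeft_eq, Nat.shiftLeft_eq]; push_cast; ring
  · show (-(m : Int) - 1) <<< k = -((m <<< k + (2 ^ k - 1) : Nat) : Int) - 1
    have h1 : (1 : Nat) ≤ 2 ^ k := Nat.one_le_two_pow
    rw [Int.shiftLeft_eq]; push_cast [Nat.shiftLeft_eq, h1]; ring

-- left shift distributes over bxor (Python two's-complement XOR)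
theorem pvBxor_shiftLeft (a b : Int) (k : Nat) :
    (PySem.Int.bxor a b) <<< k = PySem.Int.bxor (a <<< k) (b <<< k) := by
  rw [← pvDec_surj a, ← pvDec_surj b]
  generalize (decide (a < 0)) = sa
  generalize (decide (b < 0)) = sb
  generalize (if a < 0 then (-a - 1).toNat else a.toNat) = m
  generalize (if b < 0 then (-b - 1).toNat else b.toNat) = n
  rw [pvBxor_dec, pvDec_shiftLeft, pvDec_shiftLeft, pvDec_shiftLeft, pvBxor_dec]
  congr 1
  exact (pvF_xor sa sb m n k).symm

theorem pvBxor_rightComm (r c q : Int) :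
    PySem.Int.bxor (PySem.Int.bxor r c) q = PySem.Int.bxor r (PySem.Int.bxor q c) := by
  rw [← pvDec_surj r, ← pvDec_surj c, ← pvDec_surj q]
  generalize (decide (r < 0)) = sr
  generalize (decide (c < 0)) = sc
  generalize (decide (q < 0)) = sq
  generalize (if r < 0 then (-r - 1).toNat else r.toNat) = mr
  generalize (if c < 0 then (-c - 1).toNat else c.toNat) = mc
  generalize (if q < 0 then (-q - 1).toNat else q.toNat) = mq
  rw [pvBxor_dec, pvBxor_dec, pvBxor_dec, pvBxor_dec]
  congr 1
  · cases sr <;> cases sc <;> cases sq <;> rfl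
  · rw [Nat.xor_assoc, Nat.xor_comm mc]

theorem pvZero_bxor (a : Int) : PySem.Int.bxor 0 a = a := by
  rw [← pvDec_surj a]
  generalize (decide (a < 0)) = s
  generalize (if a < 0 then (-a - 1).toNat else a.toNat) = m
  have h0 : (0 : Int) = pvDec false 0 := rfl
  rw [h0, pvBxor_dec]
  cases s <;> simp [pvDec]

theorem pvShiftLeft_zero (a : Int) : a <<< (0 : Nat) = a := by
  simp [Int.shiftLeft_eq]

theorem pvShiftLeft_one_shiftLeft (a : Int) (k : Nat) : (a <<< (1 : Nat)) <<< k = a <<< (k + 1) := by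
  simp [Int.shiftLeft_eq, pow_succ]; ring

theorem pvZero_shiftLeft (k : Nat) : (0 : Int) <<< k = 0 := by
  simp [Int.shiftLeft_eq]

-- one-step unfoldings of B's recursion
theorem pvAlt_pos (x y : Int) (hy : 0 < y) :
    xor_product_alt x y = PySem.Int.bxor ((xor_product_alt x (y >>> (1 : Nat))) <<< (1 : Nat))
      (if PySem.Int.band y 1 ≠ 0 then x else 0) := by
  conv_lhs => rw [xor_product_alt]
  rw [dif_neg (by omega)]

theorem pvAlt_nonpos (x y : Int) (hy : y ≤ 0) : xor_product_alt x y = 0 := by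
  rw [xor_product_alt, dif_pos hy]

-- main invariant: A's loop accumulates r XOR (B's Horner value, shifted by bitPos)
theorem pvLoopA_eq (x : Int) : ∀ (n : Nat) (y : Int), y.toNat = n → ∀ (r : Int) (pos : Nat),
    xorLoopA x r pos y = PySem.Int.bxor r ((xor_product_alt x y) <<< pos) := by
  intro n
  induction n using Nat.strong_induction_on with
  | _ n ih =>
    intro y hn r pos
    by_cases hy : 0 < y
    · have hlt : (y >>> (1 : Nat)).toNat < n := hn ▸ pvShiftHalfLt y hy
      rw [xorLoopA, dif_pos hy, ih _ hlt _ rfl, pvAlt_pos x y hy,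
          pvBxor_shiftLeft, pvShiftLeft_one_shiftLeft]
      by_cases hb : PySem.Int.band y 1 ≠ 0
      · rw [if_pos hb, if_pos hb]
        exact pvBxor_rightComm r (x <<< pos) _
      · rw [if_neg hb, if_neg hb, pvZero_shiftLeft, PySem.Int.bxor_zero]
    · rw [xorLoopA, dif_neg hy, pvAlt_nonpos x y (by omega), pvZero_shiftLeft, PySem.Int.bxor_zero]

-- ===== VERDICT (by name: the statement is the Claim_ definition above) =====
theorem xor_product_spec : Claim_equal_xor_product := by
  intro x y _
  unfold Spec_xor_product xor_product
  rw [pvLoopA_eq x y.toNat y rfl 0 0, pvShiftLeft_zero, pvZero_bxor]
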